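-- pv_equiv track=rewrite | github.com/alexandraback/datacollection | solutions_5631989306621952_1/Python/Itsuki/main.py | solve
-- ===== SOURCE A (Python) =====
-- def solve(s):
--     s_len = len(s)
--     result = [s[0]]
--     for i in range(1, s_len):
--         if result[0] <= s[i]:
--             result.insert(0, s[i])
--         else:
--             result.append(s[i])
--     return ''.join(result)
-- ===== SOURCE B (Python) =====
-- def solve(s):
--     n = len(s)
--     pm = [s[0]]
--     for c in s[1:]:
--         pm.append(pm[-1] if pm[-1] > c else c)
--     fronts = [c for c, m in zip(s[1:], pm) if c >= m]
--     backs = [c for c, m in zip(s[1:], pm) if c < m]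
--     return ''.join(reversed(fronts)) + s[0] + ''.join(backs)
-- ===== Notes on version B (the rewrite author's own statement) =====
-- stated objective: faster
-- what changed: Replaces A's single online loop that mutates one list via insert(0)/append with staged passes: materialise a prefix-maximum table, select the prepended and appended characters by two filter comprehensions over zip(s[1:], pm), and join reversed fronts + s[0] + backs; this removes the O(n) insert(0).
import Mathlib
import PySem

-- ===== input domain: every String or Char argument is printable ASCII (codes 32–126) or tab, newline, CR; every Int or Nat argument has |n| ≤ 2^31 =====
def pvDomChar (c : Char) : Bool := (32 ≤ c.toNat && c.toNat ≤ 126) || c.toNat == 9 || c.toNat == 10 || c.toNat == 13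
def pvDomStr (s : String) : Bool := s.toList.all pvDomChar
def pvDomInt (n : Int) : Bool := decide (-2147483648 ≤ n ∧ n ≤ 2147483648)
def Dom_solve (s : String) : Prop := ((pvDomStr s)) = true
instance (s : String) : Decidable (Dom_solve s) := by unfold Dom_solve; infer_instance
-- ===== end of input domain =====

-- B replaces A's online insert(0)/append loop by staged passes over a materialised
-- prefix-maximum table (alternative decomposition). Both raise on the empty string.

-- ===== PORT A =====
-- A's loop: result starts as [s[0]]; each later char goes to the front if ≥ result[0],
-- else to the back. On the empty string Python raises IndexError (excluded by Pre_).
def solveGoA : List Char → String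
  | [] => ""   -- unreachable under Pre_solve (Python raises IndexError on "")
  | c :: rest =>
      String.ofList (rest.foldl
        (fun r ci => if r.headD ci ≤ ci then ci :: r else r ++ [ci]) [c])

def solve (s : String) : String := solveGoA s.toList

-- ===== PORT B =====
-- B's passes: build the prefix-max table pm by one append loop, then filter the
-- prepended and appended characters out of zip(s[1:], pm), then join.
def solveGoB : List Char → String
  | [] => ""   -- unreachable under Pre_solve (Python raises IndexError on "")
  | c0 :: rest =>
      let pm := rest.foldl
        (fun pm c => pm ++ [if pm.getLast! > c then pm.getLast! else c]) [c0]
      let fronts := (rest.zip pm).filterMap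
        (fun cm => if cm.1 ≥ cm.2 then some cm.1 else none)
      let backs := (rest.zip pm).filterMap
        (fun cm => if cm.1 < cm.2 then some cm.1 else none)
      String.ofList (fronts.reverse ++ [c0] ++ backs)

def solve_alt (s : String) : String := solveGoB s.toList

-- ===== PRECONDITION & SPEC =====
-- Excludes the empty string, on which Python A raises IndexError at s[0].
def Pre_solve (s : String) : Prop := s ≠ ""
instance (s : String) : Decidable (Pre_solve s) := by unfold Pre_solve; infer_instance
def pvWitness_solve : String := "ba"

def Spec_solve (s : String) (out : String) : Prop := out = solve_alt s
instance (s : String) (out : String) : Decidable (Spec_solve s out) := by unfold Spec_solve; infer_instance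

-- ===== CLAIM (what is proved, stated in full; the proofs are below) =====
def Claim_equal_solve : Prop := ∀ (s : String), Dom_solve s → Pre_solve s → Spec_solve s (solve s)

-- ===== LEMMAS AND PROOFS =====

-- reference prefix-max sequence: pmRec m l = running maxima of l seeded with m
def pmRec (m : Char) : List Char → List Char
  | [] => []
  | c :: cs => (if m > c then m else c) :: pmRec (if m > c then m else c) cs

-- B's pass-1 fold builds acc ++ [m] ++ pmRec m rest
theorem pm_fold (rest : List Char) : ∀ (acc : List Char) (m : Char),
    rest.foldl (fun pm c => pm ++ [if pm.getLast! > c then pm.getLast! else c]) (acc ++ [m])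
    = acc ++ [m] ++ pmRec m rest := by
  induction rest with
  | nil => intro acc m; simp [pmRec]
  | cons c cs ih =>
      intro acc m
      simp only [List.foldl_cons, pmRec]
      have h : (acc ++ [m]).getLast! = m := by
        simp [List.getLast!_eq_getLast?_getD, List.getLast?_append]
      rw [h]
      have := ih (acc ++ [m]) (if m > c then m else c)
      simpa using this

-- fronts / backs as selected by B from zip rest (m :: pmRec m rest)
def frontsOf (m : Char) (rest : List Char) : List Char :=
  ((rest.zip (m :: pmRec m rest)).filterMap (fun cm => if cm.1 ≥ cm.2 then some cm.1 else none))
def backsOf (m : Char) (rest : List Char) : List Char :=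
  ((rest.zip (m :: pmRec m rest)).filterMap (fun cm => if cm.1 < cm.2 then some cm.1 else none))

-- Invariant for A's loop: from state (m::t)++b, the final list is
-- reverse(fronts) ++ (m::t) ++ b ++ backs, where m is the running max (A's head).
theorem solve_key (rest : List Char) : ∀ (m : Char) (t b : List Char),
    rest.foldl (fun r ci => if r.headD ci ≤ ci then ci :: r else r ++ [ci]) ((m :: t) ++ b)
    = (frontsOf m rest).reverse ++ (m :: t) ++ b ++ backsOf m rest := by
  induction rest with
  | nil => intro m t b; simp [frontsOf, backsOf, pmRec]
  | cons c cs ih =>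
      intro m t b
      simp only [List.foldl_cons]
      have h1 : ((m :: t) ++ b).headD c = m := by simp
      rw [h1]
      by_cases h : m ≤ c
      · have hm : (if m > c then m else c) = c := by
          have : ¬ m > c := not_lt.mpr h
          simp [this]
        rw [if_pos h]
        have := ih c (m :: t) b
        simp only [frontsOf, backsOf, pmRec, hm, List.zip_cons_cons, List.filterMap_cons]
        have hge : c ≥ m := h
        rw [if_pos hge, if_neg (not_lt.mpr h)]
        simp only [List.reverse_cons]
        rw [show (c :: m :: t) = ((c :: m :: t) : List Char) from rfl] at this
        simpa [frontsOf, backsOf, List.append_assoc] using this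
      · have hm : (if m > c then m else c) = m := by
          have : m > c := lt_of_not_ge h
          simp [this]
        rw [if_neg h]
        have := ih m t (b ++ [c])
        simp only [frontsOf, backsOf, pmRec, hm, List.zip_cons_cons, List.filterMap_cons]
        have hlt : c < m := lt_of_not_ge h
        rw [if_neg (not_le.mpr hlt), if_pos hlt]
        simpa [frontsOf, backsOf, List.append_assoc] using this

-- ===== VERDICT (by name: the statement is the Claim_ definition above) =====
theorem solve_spec : Claim_equal_solve := by
  intro s _ _
  unfold Spec_solve solve solve_alt
  cases hs : s.toList with
  | nil => simp [solveGoA, solveGoB]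
  | cons c rest =>
      simp only [solveGoA, solveGoB]
      have hpm := pm_fold rest [] c
      simp only [List.nil_append] at hpm
      rw [hpm]
      have := solve_key rest c [] []
      simpa [frontsOf, backsOf] using congrArg String.ofList this
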